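-- pv_equiv track=rewrite | github.com/a-u19/AOC-25 | day6.py | process_inp
-- ===== SOURCE A (Python) =====
-- def process_inp(inp:str) -> (list, list):
--     content = inp.split("\n")
--     grid_lines = content[:-1]
--     max_len = max(len(line) for line in grid_lines)
--
--     # Pad and transpose
--     padded = [list(line.ljust(max_len)) for line in grid_lines]
--     columns = [''.join(padded[row][col] for row in range(len(padded))).strip()
--                for col in range(max_len)]
--
--     groups = []
--     current = []
--     for item in columns:
--         if item:
--             current.append(int(item))
--         elif current:
--             groups.append(current)
--             current = []
--     if current:
--         groups.append(current)
--
--     # Extract symbols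
--     symbols = [c for c in content[-1] if c != ' ']
--     return groups, symbols
-- ===== SOURCE B (Python) =====
-- def process_inp(inp: str) -> (list, list):
--     *grid_lines, tail = inp.split("\n")
--     width = max(map(len, grid_lines))
--     columns = [''.join(col).strip()
--                for col in zip(*(line.ljust(width) for line in grid_lines))]
--
--     groups = []
--     i, n = 0, len(columns)
--     while i < n:
--         if columns[i]:
--             j = i
--             while j < n and columns[j]:
--                 j += 1
--             groups.append([int(s) for s in columns[i:j]])
--             i = j
--         else:
--             i += 1
--
--     symbols = [c for c in tail if c != ' ']
--     return groups, symbols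
-- ===== Notes on version B (the rewrite author's own statement) =====
-- stated objective: alternative
-- what changed: B transposes the padded grid via zip(*padded) instead of an index double loop and collects number groups by explicit run detection (scan forward to the end of each nonempty run) instead of A's accumulator/flush state machine.
import Mathlib
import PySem

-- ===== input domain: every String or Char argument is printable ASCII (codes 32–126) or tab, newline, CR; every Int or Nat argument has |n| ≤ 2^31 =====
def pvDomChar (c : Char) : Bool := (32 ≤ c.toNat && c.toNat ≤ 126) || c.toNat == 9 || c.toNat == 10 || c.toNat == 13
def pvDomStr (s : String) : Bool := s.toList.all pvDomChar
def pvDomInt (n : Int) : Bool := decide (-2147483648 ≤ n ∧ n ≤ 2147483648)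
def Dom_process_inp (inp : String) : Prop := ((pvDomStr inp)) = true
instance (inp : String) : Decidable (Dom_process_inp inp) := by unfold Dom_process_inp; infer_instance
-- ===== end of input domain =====

-- B transposes via zip(*padded) and groups numbers by run detection instead of A's
-- index double loop and accumulator/flush state machine; alternative decomposition, same cost.

-- ===== PORT A =====
-- line.ljust(w): pad with spaces on the right to width w (hand port, exact: no PySem primitive)
def pvLjust (cs : List Char) (w : Int) : List Char :=
  cs ++ List.replicate (w.toNat - cs.length) ' '

def process_inp (inp : String) : List (List Int) × List String :=
  let content := PySem.Chars.splitOn inp.toList ['\n']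
  let grid_lines := PySem.List.slice content none (some (-1))
  -- max(...) raises ValueError on an empty list: Pre_ excludes that; getD 0 is unreachable inside Pre_
  let max_len : Int := (PySem.List.max? (grid_lines.map (fun l => PySem.Chars.len l)) (fun x => x)).getD 0
  let padded := grid_lines.map (fun line => pvLjust line max_len)
  let columns := (PySem.List.pyRange 0 max_len 1).map (fun col =>
    PySem.Chars.strip ((PySem.List.pyRange 0 (PySem.List.len padded) 1).map
      (fun row => PySem.List.pyGetD (PySem.List.pyGetD padded row []) col ' ')))
  -- int(item) raises ValueError when item does not parse: Pre_ excludes that; getD 0 is unreachable inside Pre_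
  let r := columns.foldl (fun (acc : List (List Int) × List Int) item =>
      if item ≠ [] then (acc.1, acc.2 ++ [(PySem.Int.ofChars? item).getD 0])
      else if acc.2 ≠ [] then (acc.1 ++ [acc.2], ([] : List Int))
      else acc) ([], [])
  let groups := if r.2 ≠ [] then r.1 ++ [r.2] else r.1
  let lastLine := (PySem.List.pyGet? content (-1)).getD []
  (groups, (lastLine.filter (fun c => c ≠ ' ')).map (fun c => String.ofList [c]))

-- ===== PORT B =====
-- zip(*rows): emit the heads while every row is nonempty (Python zip truncates at the shortest row)
def pvZip (rows : List (List Char)) : List (List Char) :=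
  if _h : rows ≠ [] ∧ rows.all (fun r => !r.isEmpty) then
    (rows.map (fun r => r.headD ' ')) :: pvZip (rows.map (fun r => r.tail))
  else []
termination_by (rows.headD []).length
decreasing_by
  obtain ⟨hne, hall⟩ := _h
  cases rows with
  | nil => exact absurd rfl hne
  | cons a t =>
      simp only [List.headD_cons]
      have : a ≠ [] := by
        have := List.all_eq_true.mp hall a (List.mem_cons_self ..)
        simpa using this
      cases a with
      | nil => exact absurd rfl this
      | cons x xs => simp

-- maximal runs of nonempty strings (the while-scan in Source B: take a run, skip blanks)
def pvRuns (cols : List (List Char)) : List (List (List Char)) :=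
  match cols with
  | [] => []
  | c :: cs =>
      if c = [] then pvRuns cs
      else (c :: cs.takeWhile (fun s => s ≠ [])) :: pvRuns (cs.dropWhile (fun s => s ≠ []))
termination_by cols.length
decreasing_by
  · simp
  · have := List.length_dropWhile_le (p := fun s => s ≠ ([] : List Char)) (l := cs)
    simp only [List.length_cons]; omega

def process_inp_alt (inp : String) : List (List Int) × List String :=
  let parts := PySem.Chars.splitOn inp.toList ['\n']
  let tail := (parts.getLast?).getD []
  let grid_lines := parts.dropLast
  -- max(...) raises ValueError on an empty list: Pre_ excludes that; getD 0 is unreachable inside Pre_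
  let width : Int := (PySem.List.max? (grid_lines.map (fun l => PySem.Chars.len l)) (fun x => x)).getD 0
  let columns := (pvZip (grid_lines.map (fun line => pvLjust line width))).map PySem.Chars.strip
  let groups := (pvRuns columns).map (fun run => run.map (fun s => (PySem.Int.ofChars? s).getD 0))
  (groups, (tail.filter (fun c => c ≠ ' ')).map (fun c => String.ofList [c]))

-- ===== PRECONDITION & SPEC =====
-- Pre_ excludes exactly the inputs where the Python A raises: no newline (so the grid is empty and
-- max() raises ValueError) or some nonblank vertical column whose stripped text is not an int literal
-- (so int() raises ValueError).  B raises the same exceptions there.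
def Pre_process_inp (inp : String) : Prop :=
  let parts := PySem.Chars.splitOn inp.toList ['\n']
  let grid := parts.dropLast
  let w := (grid.map List.length).foldr max 0
  2 ≤ parts.length ∧
    ∀ c ∈ List.range w,
      PySem.Chars.strip (grid.map (fun l => l.getD c ' ')) ≠ [] →
        (PySem.Int.ofChars? (PySem.Chars.strip (grid.map (fun l => l.getD c ' ')))).isSome = true
instance (inp : String) : Decidable (Pre_process_inp inp) := by unfold Pre_process_inp; infer_instance

def pvWitness_process_inp : String := "1\n2\n+"

def Spec_process_inp (inp : String) (out : List (List Int) × List String) : Prop := out = process_inp_alt inp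
instance (inp : String) (out : List (List Int) × List String) : Decidable (Spec_process_inp inp out) := by unfold Spec_process_inp; infer_instance

-- ===== CLAIM (what is proved, stated in full; the proofs are below) =====
def Claim_equal_process_inp : Prop := ∀ (inp : String), Dom_process_inp inp → Pre_process_inp inp → Spec_process_inp inp (process_inp inp)

-- ===== LEMMAS AND PROOFS =====

-- zip(*rows) on a rectangular grid is the column-indexed double loop
theorem columns_eq (w : Nat) : ∀ (rows : List (List Char)), (∀ r ∈ rows, r.length = w) → rows ≠ [] →
    pvZip rows = (List.range w).map (fun c => rows.map (fun r => r.getD c ' ')) := by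
  induction w with
  | zero =>
    intro rows h hne
    obtain ⟨a, t, rfl⟩ := List.exists_cons_of_ne_nil hne
    have ha : a = [] := List.eq_nil_of_length_eq_zero (h a (by simp))
    rw [pvZip]
    simp [ha]
  | succ n ih =>
    intro rows h hne
    have hall : rows.all (fun r => !r.isEmpty) = true := by
      rw [List.all_eq_true]
      intro r hr
      have hl := h r hr
      cases r with
      | nil => simp at hl
      | cons x xs => simp
    rw [pvZip, dif_pos ⟨hne, hall⟩]
    have htails : ∀ r ∈ rows.map List.tail, r.length = n := by
      intro r hr
      rw [List.mem_map] at hr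
      obtain ⟨s, hs, rfl⟩ := hr
      have := h s hs
      simp [List.length_tail, this]
    have hne' : rows.map List.tail ≠ [] := by simpa using hne
    rw [ih _ htails hne', List.range_succ_eq_map]
    have h1 : ∀ r : List Char, r.headD ' ' = r.getD 0 ' ' := by intro r; cases r <;> rfl
    have h2 : ∀ (c : Nat) (r : List Char), r.tail.getD c ' ' = r.getD (c+1) ' ' := by
      intro c r; cases r <;> rfl
    simp only [List.map_cons, List.map_map, Function.comp_def, Nat.succ_eq_add_one]
    congr 1
    · exact List.map_congr_left (fun a _ => h1 a)
    · exact List.map_congr_left (fun c _ => List.map_congr_left (fun a _ => h2 c a))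

-- A's accumulator/flush loop produces exactly the maximal nonempty runs, converted
theorem loop_eq (conv : List Char → Int) (cols : List (List Char)) : ∀ (gs : List (List Int)),
    ((fun (r : List (List Int) × List Int) => if r.2 ≠ [] then r.1 ++ [r.2] else r.1)
      (cols.foldl (fun acc item =>
        if item ≠ [] then (acc.1, acc.2 ++ [conv item])
        else if acc.2 ≠ [] then (acc.1 ++ [acc.2], ([] : List Int))
        else acc) (gs, [])) = gs ++ (pvRuns cols).map (fun run => run.map conv))
    ∧ (∀ cur : List Int, cur ≠ [] →
      (fun (r : List (List Int) × List Int) => if r.2 ≠ [] then r.1 ++ [r.2] else r.1)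
        (cols.foldl (fun acc item =>
          if item ≠ [] then (acc.1, acc.2 ++ [conv item])
          else if acc.2 ≠ [] then (acc.1 ++ [acc.2], ([] : List Int))
          else acc) (gs, cur))
      = gs ++ ((cur ++ (cols.takeWhile (fun s => s ≠ [])).map conv)
          :: (pvRuns (cols.dropWhile (fun s => s ≠ []))).map (fun run => run.map conv))) := by
  induction cols with
  | nil =>
    intro gs
    refine ⟨by simp [pvRuns], ?_⟩
    intro cur hcur
    simp [pvRuns, hcur]
  | cons c cs ih =>
    intro gs
    constructor
    · by_cases hc : c = []
      · subst hc
        simpa [pvRuns] using (ih gs).1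
      · have := (ih gs).2 [conv c] (by simp)
        simp only [List.foldl_cons, if_pos hc, pvRuns, if_neg hc]
        simpa [hc] using this
    · intro cur hcur
      by_cases hc : c = []
      · subst hc
        have estep : (List.foldl (fun (acc : List (List Int) × List Int) item =>
              if item ≠ [] then (acc.1, acc.2 ++ [conv item])
              else if acc.2 ≠ [] then (acc.1 ++ [acc.2], ([] : List Int))
              else acc) (gs, cur) (([] : List Char) :: cs))
            = (List.foldl (fun (acc : List (List Int) × List Int) item =>
              if item ≠ [] then (acc.1, acc.2 ++ [conv item])
              else if acc.2 ≠ [] then (acc.1 ++ [acc.2], ([] : List Int))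
              else acc) (gs ++ [cur], []) cs) := by
          rw [List.foldl_cons]
          simp [hcur]
        rw [estep, (ih (gs ++ [cur])).1]
        simp [pvRuns]
      · have := (ih gs).2 (cur ++ [conv c]) (by simp)
        simp only [List.foldl_cons, if_pos hc]
        simpa [hc, List.takeWhile_cons, List.dropWhile_cons] using this

-- an index loop over pyRange reading pyGetD, post-composed with g, is map g
theorem map_pyGetD_pyRange_zero_comp {α β : Type} (xs : List α) (d : α) (g : α → β) :
    (PySem.List.pyRange 0 (PySem.List.len xs) 1).map (fun j => g (PySem.List.pyGetD xs j d))
      = xs.map g := by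
  have := PySem.List.map_pyGetD_pyRange_zero xs d
  calc (PySem.List.pyRange 0 (PySem.List.len xs) 1).map (fun j => g (PySem.List.pyGetD xs j d))
      = ((PySem.List.pyRange 0 (PySem.List.len xs) 1).map (fun j => PySem.List.pyGetD xs j d)).map g := by
        rw [List.map_map]; rfl
    _ = xs.map g := by rw [this]

-- A's index-double-loop columns are B's zip-then-strip columns
theorem cols_bridge (grid : List (List Char)) (wI : Int)
    (hw0 : 0 ≤ wI) (hmax : ∀ l ∈ grid, PySem.Chars.len l ≤ wI) (hz : grid = [] → wI = 0) :
    (PySem.List.pyRange 0 wI 1).map (fun col =>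
      PySem.Chars.strip ((PySem.List.pyRange 0 (PySem.List.len (grid.map (fun line => pvLjust line wI))) 1).map
        (fun row => PySem.List.pyGetD (PySem.List.pyGetD (grid.map (fun line => pvLjust line wI)) row []) col ' ')))
    = (pvZip (grid.map (fun line => pvLjust line wI))).map PySem.Chars.strip := by
  set padded := grid.map (fun line => pvLjust line wI) with hp
  have hrect : ∀ r ∈ padded, r.length = wI.toNat := by
    intro r hr
    rw [hp, List.mem_map] at hr
    obtain ⟨l, hl, rfl⟩ := hr
    have h1 := hmax l hl
    rw [PySem.Chars.len_eq] at h1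
    simp only [pvLjust, List.length_append, List.length_replicate]
    omega
  have hinner : ∀ col : Int, (PySem.List.pyRange 0 (PySem.List.len padded) 1).map
      (fun row => PySem.List.pyGetD (PySem.List.pyGetD padded row []) col ' ')
      = padded.map (fun r => PySem.List.pyGetD r col ' ') :=
    fun col => map_pyGetD_pyRange_zero_comp padded [] (fun r => PySem.List.pyGetD r col ' ')
  by_cases hg : grid = []
  · subst hg
    have hw : wI = ((0 : Nat) : Int) := by simpa using hz rfl
    rw [hp]
    rw [pvZip]
    rw [hw, PySem.List.pyRange_zero_natCast]
    simp
  · have hne : padded ≠ [] := by simp [hp, hg]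
    have hcz := columns_eq wI.toNat padded hrect hne
    rw [hcz, List.map_map]
    conv_lhs => rw [show wI = ((wI.toNat : Nat) : Int) from (Int.toNat_of_nonneg hw0).symm]
    rw [PySem.List.pyRange_zero_natCast, List.map_map]
    refine List.map_congr_left ?_
    intro k _
    simp only [Function.comp_def]
    rw [hinner (k : Int)]
    congr 1
    refine List.map_congr_left ?_
    intro r _
    rw [PySem.List.pyGetD_natCast]

-- ===== VERDICT (by name: the statement is the Claim_ definition above) =====
theorem process_inp_spec : Claim_equal_process_inp := by
  intro inp _ _
  unfold Spec_process_inp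
  simp only [process_inp, process_inp_alt, PySem.List.slice_to_neg_one, PySem.List.pyGet?_neg_one]
  set content := PySem.Chars.splitOn inp.toList ['\n'] with hcontent
  set grid := content.dropLast with hgrid
  set wI : Int := (PySem.List.max? (grid.map (fun l => PySem.Chars.len l)) (fun x => x)).getD 0 with hwI
  have hw0 : 0 ≤ wI := by
    rw [hwI]
    cases h : PySem.List.max? (grid.map (fun l => PySem.Chars.len l)) (fun x => x) with
    | none => simp
    | some m =>
      have hm := PySem.List.max?_mem h
      rw [List.mem_map] at hm
      obtain ⟨l, _, rfl⟩ := hm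
      simp [PySem.Chars.len_eq]
  have hmax : ∀ l ∈ grid, PySem.Chars.len l ≤ wI := by
    intro l hl
    rw [hwI]
    cases h : PySem.List.max? (grid.map (fun l => PySem.Chars.len l)) (fun x => x) with
    | none =>
      have hg : grid = [] := by simpa using List.map_eq_nil_iff.mp ((PySem.List.max?_eq_none_iff _ _).mp h)
      rw [hg] at hl
      simp at hl
    | some m =>
      have := PySem.List.max?_isMax h (PySem.Chars.len l) (List.mem_map_of_mem hl)
      simpa using this
  have hz : grid = [] → wI = 0 := by
    intro hg
    rw [hwI, hg]
    have hnone : PySem.List.max? (List.map (fun l => PySem.Chars.len l) ([] : List (List Char))) (fun x => x) = none :=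
      (PySem.List.max?_eq_none_iff _ _).mpr (by simp)
    rw [hnone]
    rfl
  have hcols := cols_bridge grid wI hw0 hmax hz
  rw [hcols]
  have hloop := (loop_eq (fun s => (PySem.Int.ofChars? s).getD 0)
      ((pvZip (grid.map (fun line => pvLjust line wI))).map PySem.Chars.strip) []).1
  simp only [] at hloop
  rw [hloop]
  simp
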